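-- pv_equiv track=rewrite | github.com/JBEI/edd | main/parsers/hplc.py | _get_table_header
-- ===== SOURCE A (Python) =====
-- def _get_table_header(header_block):
--     # collect table header, "Sample Name", etc.
--     # cliping it off the end of the header block
--     table_header = []
--     table_divider = header_block[-1]  # indicates column widths
--     r_index = -2
--     line = header_block[r_index]
--     while line != "" and not line.isspace():
--         table_header.append(line)
--         r_index -= 1
--         line = header_block[r_index]
--     table_header.reverse()
--
--     # collect header data, currently not parsed
--     # (removes table header from header block)
--     header_block = header_block[1:r_index]
--
--     return header_block, table_header, table_divider
-- ===== SOURCE B (Python) =====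
-- def _get_table_header(header_block):
--     # table divider is the last line; find the LAST blank line before it with
--     # one forward pass, then slice the block around it.
--     table_divider = header_block[-1]
--     body = header_block[:-1]
--     b = max(i for i, line in enumerate(body) if line == "" or line.isspace())
--     return body[1:b], body[b + 1:], table_divider
-- ===== Notes on version B (the rewrite author's own statement) =====
-- stated objective: simpler
-- what changed: Replaces the backward while-loop with negative indices that builds table_header by append+reverse with a single forward enumerate pass taking the max blank-line index and three plain slices.
import Mathlib
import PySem

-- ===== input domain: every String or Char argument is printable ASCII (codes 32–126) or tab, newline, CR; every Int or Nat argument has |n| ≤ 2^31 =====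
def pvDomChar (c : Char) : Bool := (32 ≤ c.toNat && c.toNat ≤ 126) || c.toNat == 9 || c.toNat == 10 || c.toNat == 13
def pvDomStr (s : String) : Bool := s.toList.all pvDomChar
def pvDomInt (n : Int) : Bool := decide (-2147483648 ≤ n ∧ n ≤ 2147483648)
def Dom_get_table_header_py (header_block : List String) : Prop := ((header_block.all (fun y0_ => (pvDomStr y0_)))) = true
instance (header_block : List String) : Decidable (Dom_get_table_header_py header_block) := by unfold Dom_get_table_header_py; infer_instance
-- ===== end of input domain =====

-- B replaces A's backward while-loop (negative indices, append+reverse) by one forward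
-- pass taking the max blank-line index and three plain slices; objective: simpler.

-- ===== PORT A =====
-- the backward while loop: fetch hb[r]; while nonblank, append and step r down.
-- 'none' from pyGet? is Python's IndexError (excluded by Pre_); we return the state there.
def aLoop (hb : List String) (acc : List String) (r : Int) : Nat → List String × Int
  | 0 => (acc, r)
  | fuel+1 =>
    match PySem.List.pyGet? hb r with
    | none => (acc, r)
    | some line =>
      if !(line == "") && !(PySem.Str.strIsspace line)
      then aLoop hb (acc ++ [line]) (r - 1) fuel
      else (acc, r)

def get_table_header_py (header_block : List String) : List String × List String × String :=
  match PySem.List.pyGet? header_block (-1) with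
  | none => ([], [], "")  -- IndexError on empty input, excluded by Pre_
  | some table_divider =>
    let p := aLoop header_block [] (-2) header_block.length
    (PySem.List.slice header_block (some 1) (some p.2), p.1.reverse, table_divider)

-- ===== PORT B =====
def get_table_header_py_alt (header_block : List String) : List String × List String × String :=
  match PySem.List.pyGet? header_block (-1) with
  | none => ([], [], "")  -- IndexError on empty input, excluded by Pre_
  | some table_divider =>
    let body := PySem.List.slice header_block none (some (-1))
    let idxs := ((PySem.List.enumerate body 0).filter
                  (fun p => p.2 == "" || PySem.Str.strIsspace p.2)).map Prod.fst
    match PySem.List.max? idxs (fun x => x) with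
    | none => ([], [], "")  -- max() of empty generator (ValueError), excluded by Pre_
    | some b =>
      (PySem.List.slice body (some 1) (some b),
       PySem.List.slice body (some (b + 1)) none,
       table_divider)

-- ===== PRECONDITION & SPEC =====
-- Pre_ excludes exactly the inputs on which A raises IndexError: blocks with fewer than
-- two lines, and blocks whose lines before the divider are all nonblank (the backward
-- scan runs off the front end).
def Pre_get_table_header_py (header_block : List String) : Prop :=
  2 ≤ header_block.length ∧
    ∃ s ∈ header_block.dropLast, (s = "" ∨ PySem.Str.strIsspace s = true)
instance (header_block : List String) : Decidable (Pre_get_table_header_py header_block) := by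
  unfold Pre_get_table_header_py; infer_instance

def pvWitness_get_table_header_py : List String :=
  ["File Information", "", "Sample Name", "---------- ----------"]

def Spec_get_table_header_py (header_block : List String) (out : List String × List String × String) : Prop := out = get_table_header_py_alt header_block
instance (header_block : List String) (out : List String × List String × String) : Decidable (Spec_get_table_header_py header_block out) := by unfold Spec_get_table_header_py; infer_instance

-- ===== CLAIM (what is proved, stated in full; the proofs are below) =====
def Claim_equal_get_table_header_py : Prop := ∀ (header_block : List String), Dom_get_table_header_py header_block → Pre_get_table_header_py header_block → Spec_get_table_header_py header_block (get_table_header_py header_block)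

-- ===== LEMMAS AND PROOFS =====

-- the blank test both programs use
def pvBlank (s : String) : Bool := s == "" || PySem.Str.strIsspace s

-- A's loop, started at index k + d (counted from the front) where hb[k] is the last
-- blank line before the divider, stops at k having collected hb[k+1..k+d] in reverse.
lemma aLoop_eq (hb : List String) (k : Nat)
    (hk : k + 2 ≤ hb.length)
    (hblank : pvBlank (hb[k]'(by omega)) = true)
    (hnb : ∀ i (hi : i + 2 ≤ hb.length), k < i → pvBlank (hb[i]'(by omega)) = false) :
    ∀ (d : Nat) (acc : List String) (fuel : Nat), k + d + 2 ≤ hb.length → d < fuel →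
    aLoop hb acc (((k + d : Nat) : Int) - (hb.length : Int)) fuel
      = (acc ++ ((hb.drop (k+1)).take d).reverse, (k : Int) - (hb.length : Int)) := by
  intro d
  induction d with
  | zero =>
    intro acc fuel hkd hfuel
    obtain ⟨f, rfl⟩ : ∃ f, fuel = f + 1 := ⟨fuel - 1, by omega⟩
    have hget : PySem.List.pyGet? hb (((k + 0 : Nat) : Int) - (hb.length : Int))
        = some (hb[k]'(by omega)) := by
      have h1 : (((k + 0 : Nat) : Int) - (hb.length : Int)) = -((hb.length - k : Nat) : Int) := by
        push_cast [Nat.cast_sub (by omega : k ≤ hb.length)]; ring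
      rw [h1, PySem.List.pyGet?_neg_natCast hb (hb.length - k) (by omega) (by omega)]
      have h2 : hb.length - (hb.length - k) = k := by omega
      rw [h2, List.getElem?_eq_getElem (by omega)]
    simp only [aLoop, hget]
    have hcond : (!(hb[k]'(by omega) == "") && !(PySem.Str.strIsspace (hb[k]'(by omega)))) = false := by
      have := hblank; unfold pvBlank at this
      simp only [← Bool.not_or, this, Bool.not_true]
    rw [hcond]
    simp
  | succ d ih =>
    intro acc fuel hkd hfuel
    obtain ⟨f, rfl⟩ : ∃ f, fuel = f + 1 := ⟨fuel - 1, by omega⟩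
    have hi : k + d + 1 < hb.length := by omega
    have hget : PySem.List.pyGet? hb (((k + (d+1) : Nat) : Int) - (hb.length : Int))
        = some (hb[k + d + 1]'hi) := by
      have h1 : (((k + (d+1) : Nat) : Int) - (hb.length : Int))
          = -((hb.length - (k + d + 1) : Nat) : Int) := by
        push_cast [Nat.cast_sub (by omega : k + d + 1 ≤ hb.length)]; ring
      rw [h1, PySem.List.pyGet?_neg_natCast hb (hb.length - (k + d + 1)) (by omega) (by omega)]
      have h2 : hb.length - (hb.length - (k + d + 1)) = k + d + 1 := by omega
      rw [h2, List.getElem?_eq_getElem hi]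
    simp only [aLoop, hget]
    have hcond : (!(hb[k+d+1]'hi == "") && !(PySem.Str.strIsspace (hb[k+d+1]'hi))) = true := by
      have := hnb (k+d+1) (by omega) (by omega)
      unfold pvBlank at this
      simp only [← Bool.not_or, this, Bool.not_false]
    rw [hcond]
    have hr : (((k + (d+1) : Nat) : Int) - (hb.length : Int)) - 1
        = (((k + d : Nat) : Int) - (hb.length : Int)) := by push_cast; ring
    rw [hr, ih (acc ++ [hb[k+d+1]'hi]) f (by omega) (by omega)]
    have htake : (hb.drop (k+1)).take (d+1)
        = (hb.drop (k+1)).take d ++ [hb[k+d+1]'hi] := by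
      rw [List.take_add_one, List.getElem?_drop, show k + 1 + d = k + d + 1 from by omega,
        List.getElem?_eq_getElem hi]
      simp
    rw [htake]
    simp

-- take commutes with dropLast when the prefix stays inside
lemma take_dropLast_eq (l : List String) (m : Nat) (h : m + 1 ≤ l.length) :
    l.dropLast.take m = l.take m := by
  rw [List.dropLast_eq_take, List.take_take]
  congr 1
  omega

-- drop commutes with dropLast
lemma drop_dropLast_eq (l : List String) (n : Nat) :
    l.dropLast.drop n = (l.drop n).dropLast := by
  rw [List.dropLast_eq_take, List.dropLast_eq_take, List.drop_take, List.length_drop]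
  congr 1
  omega

theorem get_table_header_py_spec : Claim_equal_get_table_header_py := by
  intro hb _ hpre
  obtain ⟨hlen, s, hs, hsblank⟩ := hpre
  have hne : hb ≠ [] := by intro h; simp [h] at hlen
  obtain ⟨dv, hdiv⟩ : ∃ d, PySem.List.pyGet? hb (-1) = some d := by
    rw [PySem.List.pyGet?_neg_one]
    exact ⟨hb.getLast hne, List.getLast?_eq_some_getLast hne⟩
  unfold Spec_get_table_header_py get_table_header_py get_table_header_py_alt
  simp only [hdiv, PySem.List.slice_to_neg_one]
  set body := hb.dropLast with hbody
  have hbodylen : body.length = hb.length - 1 := by simp [hbody]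
  set idxs := ((PySem.List.enumerate body 0).filter
      (fun p => p.2 == "" || PySem.Str.strIsspace p.2)).map Prod.fst with hidxs
  -- idxs is nonempty: s sits at some index of body
  obtain ⟨j, hj, hjs⟩ := List.mem_iff_getElem.mp hs
  have hjmem : ((j : Int)) ∈ idxs := by
    rw [hidxs]
    refine List.mem_map.mpr ⟨((j : Int), body[j]'hj), ?_, rfl⟩
    refine List.mem_filter.mpr ⟨?_, ?_⟩
    · exact (PySem.List.mem_enumerate_iff body 0 _).mpr ⟨j, hj, by simp⟩
    · show ((body[j]'hj) == "" || PySem.Str.strIsspace (body[j]'hj)) = true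
      rw [hjs]
      rcases hsblank with h | h
      · simp [h]
      · rw [h]; simp
  have hidxne : idxs ≠ [] := by intro h; rw [h] at hjmem; exact absurd hjmem (List.not_mem_nil)
  obtain ⟨bI, hbI⟩ : ∃ b, PySem.List.max? idxs (fun x => x) = some b := by
    cases h : PySem.List.max? idxs (fun x => x) with
    | none => exact absurd ((PySem.List.max?_eq_none_iff idxs _).mp h) hidxne
    | some b => exact ⟨b, rfl⟩
  rw [hbI]
  -- characterize bI: it is ↑k for the greatest blank index k of body
  have hbImem := PySem.List.max?_mem hbI
  have hbImax : ∀ y ∈ idxs, y ≤ bI := fun y hy => PySem.List.max?_isMax hbI y hy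
  obtain ⟨p, hpfil, hp1⟩ := List.mem_map.mp hbImem
  have hpfil' := List.mem_filter.mp hpfil
  obtain ⟨k, hk, hpk⟩ := (PySem.List.mem_enumerate_iff body 0 p).mp hpfil'.1
  have hbIk : bI = (k : Int) := by rw [← hp1, hpk]; simp
  have hkblank : ((body[k]'hk) == "" || PySem.Str.strIsspace (body[k]'hk)) = true := by
    have h2 := hpfil'.2; rw [hpk] at h2; exact h2
  have hk2 : k + 2 ≤ hb.length := by omega
  have hbk : body[k]'hk = hb[k]'(by omega) := List.getElem_dropLast ..
  have hkblank' : pvBlank (hb[k]'(by omega : k < hb.length)) = true := by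
    unfold pvBlank; rw [← hbk]; exact hkblank
  -- every later index of body is nonblank
  have hnb : ∀ i (hi : i + 2 ≤ hb.length), k < i → pvBlank (hb[i]'(by omega)) = false := by
    intro i hi hki
    by_contra hblk
    have hib : i < body.length := by omega
    have hblk' : ((body[i]'hib) == "" || PySem.Str.strIsspace (body[i]'hib)) = true := by
      have hbi : body[i]'hib = hb[i]'(by omega) := List.getElem_dropLast ..
      rw [hbi]
      revert hblk; unfold pvBlank; cases ((hb[i]'(by omega : i < hb.length)) == "" || PySem.Str.strIsspace (hb[i]'(by omega : i < hb.length))) <;> simp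
    have hmem : ((i : Int)) ∈ idxs := by
      rw [hidxs]
      refine List.mem_map.mpr ⟨((i : Int), body[i]'hib), ?_, rfl⟩
      refine List.mem_filter.mpr ⟨?_, ?_⟩
      · exact (PySem.List.mem_enumerate_iff body 0 _).mpr ⟨i, hib, by simp⟩
      · exact hblk'
    have hle := hbImax _ hmem
    rw [hbIk] at hle
    exact absurd (by exact_mod_cast hle) (by omega)
  -- run A's loop
  have hstart : (-2 : Int) = (((k + (hb.length - 2 - k) : Nat)) : Int) - (hb.length : Int) := by
    have hkle : k ≤ hb.length - 2 := by omega
    push_cast [Nat.add_sub_cancel' hkle, Nat.cast_sub hlen]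
    ring
  have hloop := aLoop_eq hb k hk2 hkblank' hnb (hb.length - 2 - k) []
      hb.length (by omega) (by omega)
  rw [← hstart] at hloop
  simp only [hloop, List.nil_append, List.reverse_reverse]
  -- compare the three components
  refine Prod.ext ?_ (Prod.ext ?_ rfl)
  · -- header block slice: hb[1 : k - n] = body[1 : k]
    show PySem.List.slice hb (some 1) (some ((k : Int) - (hb.length : Int)))
        = PySem.List.slice body (some 1) (some bI)
    rw [hbIk]
    simp only [PySem.List.slice]
    have hc1 : PySem.List.clampIdx hb.length 1 = 1 := by
      simp [PySem.List.clampIdx]; omega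
    have hc1' : PySem.List.clampIdx body.length 1 = 1 := by
      simp [PySem.List.clampIdx]; omega
    have hcneg : PySem.List.clampIdx hb.length ((k : Int) - (hb.length : Int)) = k := by
      have h1 : ((k : Int) - (hb.length : Int)) = -((hb.length - k : Nat) : Int) := by
        push_cast [Nat.cast_sub (by omega : k ≤ hb.length)]; ring
      rw [h1, PySem.List.clampIdx_neg_natCast _ _ (by omega)]
      omega
    have hck : PySem.List.clampIdx body.length (k : Int) = k := by
      unfold PySem.List.clampIdx
      rw [if_neg (by omega : ¬ ((k : Int) < 0))]
      simp only [Int.toNat_natCast]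
      omega
    rw [hc1, hc1', hcneg, hck]
    rw [hbody, drop_dropLast_eq, take_dropLast_eq _ _ (by rw [List.length_drop]; omega)]
  · -- table header: (hb.drop (k+1)).take (n-2-k) = body.drop (k+1)
    show (hb.drop (k + 1)).take (hb.length - 2 - k) = PySem.List.slice body (some (bI + 1)) none
    rw [hbIk]
    have hcast : ((k : Int) + 1) = ((k + 1 : Nat) : Int) := by push_cast; ring
    rw [hcast, PySem.List.slice_from body (by positivity), Int.toNat_natCast]
    rw [hbody, drop_dropLast_eq, List.dropLast_eq_take, List.length_drop]
    congr 1
    omega
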